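-- pv_equiv track=rewrite | github.com/BigPolarBear1/factorization_v3 | QSv3_034.py | find_solution_x
-- ===== SOURCE A (Python) =====
-- def equation(y,x,n,mod,z,z2):
--     rem=z*(x**2)-y*x+n*z2
--     rem2=rem%mod
--     return rem2,rem
--
-- def find_solution_x(n,mod,y,z,z2):
--     ##to do: can use tonelli if this ends up taking too long
--     rlist=[]
--     x=0
--     while x<mod:
--         test,test2=equation(y,x,n,mod,z,z2)
--         if test == 0:
--             rlist.append(x)
--         x+=1
--     return rlist
-- ===== SOURCE B (Python) =====
-- def find_solution_x(n, mod, y, z, z2):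
--     # Incremental evaluation of the quadratic via first/second differences.
--     rlist = []
--     val = n * z2          # f(0)
--     delta = z - y         # f(1) - f(0)
--     for x in range(mod):
--         if val % mod == 0:
--             rlist.append(x)
--         val += delta
--         delta += 2 * z
--     return rlist
-- ===== Notes on version B (the rewrite author's own statement) =====
-- stated objective: faster
-- what changed: B replaces the per-iteration recomputation of z*x**2 - y*x + n*z2 (an exponentiation and multiplications each step) by a finite-difference recurrence: it keeps running first and second differences (val, delta) and updates them by additions only, iterating with a for-over-range instead of A's while loop with a manual counter.
import Mathlib
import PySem

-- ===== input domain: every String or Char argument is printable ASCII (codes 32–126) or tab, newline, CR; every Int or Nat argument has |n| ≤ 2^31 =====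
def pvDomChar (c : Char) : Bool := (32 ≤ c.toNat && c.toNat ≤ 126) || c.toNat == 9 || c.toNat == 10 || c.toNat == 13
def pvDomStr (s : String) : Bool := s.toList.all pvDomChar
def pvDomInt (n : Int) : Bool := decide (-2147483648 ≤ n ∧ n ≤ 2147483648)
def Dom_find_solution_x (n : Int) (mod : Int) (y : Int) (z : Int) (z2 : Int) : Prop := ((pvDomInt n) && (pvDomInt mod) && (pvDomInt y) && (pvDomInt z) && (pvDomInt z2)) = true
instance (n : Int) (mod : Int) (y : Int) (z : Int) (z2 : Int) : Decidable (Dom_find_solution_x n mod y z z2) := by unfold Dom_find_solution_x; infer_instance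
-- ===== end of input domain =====

-- B evaluates the quadratic by a finite-difference recurrence (two additions per step)
-- instead of recomputing z*x^2 - y*x + n*z2 each iteration; alternative decomposition, same cost class.


-- ===== PORT A =====
-- helper: rem = z*x**2 - y*x + n*z2; returns (rem % mod, rem)
def equationA (y x n mod z z2 : Int) : Int × Int :=
  let rem := z * x ^ 2 - y * x + n * z2
  let rem2 := PySem.Int.mod rem mod
  (rem2, rem)

-- the while-loop of A, fuelled by the remaining iteration count
def loopA (n mod y z z2 : Int) : Nat → Int → List Int → List Int
  | 0, _, rlist => rlist
  | f + 1, x, rlist =>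
    if x < mod then
      let t := equationA y x n mod z z2
      loopA n mod y z z2 f (x + 1) (if t.1 == 0 then rlist ++ [x] else rlist)
    else rlist

def find_solution_x (n : Int) (mod : Int) (y : Int) (z : Int) (z2 : Int) : List Int :=
  loopA n mod y z z2 mod.toNat 0 []

-- ===== PORT B =====
def find_solution_x_alt (n : Int) (mod : Int) (y : Int) (z : Int) (z2 : Int) : List Int :=
  let s := (PySem.List.pyRange 0 mod 1).foldl
    (fun (st : Int × Int × List Int) x =>
      let rl := if PySem.Int.mod st.1 mod == 0 then st.2.2 ++ [x] else st.2.2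
      (st.1 + st.2.1, st.2.1 + 2 * z, rl))
    (n * z2, z - y, ([] : List Int))
  s.2.2

-- ===== PRECONDITION & SPEC =====
def Spec_find_solution_x (n : Int) (mod : Int) (y : Int) (z : Int) (z2 : Int) (out : List Int) : Prop := out = find_solution_x_alt n mod y z z2
instance (n : Int) (mod : Int) (y : Int) (z : Int) (z2 : Int) (out : List Int) : Decidable (Spec_find_solution_x n mod y z z2 out) := by unfold Spec_find_solution_x; infer_instance

-- ===== CLAIM (what is proved, stated in full; the proofs are below) =====
def Claim_equal_find_solution_x : Prop := ∀ (n : Int) (mod : Int) (y : Int) (z : Int) (z2 : Int), Dom_find_solution_x n mod y z z2 → Spec_find_solution_x n mod y z z2 (find_solution_x n mod y z z2)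

-- ===== LEMMAS AND PROOFS =====

-- Loop invariant: if val = f(x) and delta = f(x+1) - f(x), A's while loop from x equals
-- B's fold over range(x, mod) (third component), provided the fuel covers the remaining steps.
theorem loopA_eq_fold (n mod y z z2 : Int) :
    ∀ (f : Nat) (x val delta : Int) (acc : List Int),
      val = z * x ^ 2 - y * x + n * z2 →
      delta = 2 * z * x + z - y →
      (mod - x).toNat ≤ f →
      loopA n mod y z z2 f x acc =
        ((PySem.List.pyRange x mod 1).foldl
          (fun (st : Int × Int × List Int) t =>
            let rl := if PySem.Int.mod st.1 mod == 0 then st.2.2 ++ [t] else st.2.2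
            (st.1 + st.2.1, st.2.1 + 2 * z, rl))
          (val, delta, acc)).2.2 := by
  intro f
  induction f with
  | zero =>
    intro x val delta acc hv hd hf
    have hmx : mod ≤ x := by omega
    rw [PySem.List.pyRange_one_eq_nil hmx]
    simp [loopA]
  | succ f ih =>
    intro x val delta acc hv hd hf
    by_cases hx : x < mod
    · rw [PySem.List.pyRange_one_cons hx]
      simp only [List.foldl_cons, loopA, if_pos hx]
      have hrem : (equationA y x n mod z z2).1 = PySem.Int.mod val mod := by
        simp [equationA, hv]
      rw [hrem]
      exact ih (x + 1) (val + delta) (delta + 2 * z) _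
        (by rw [hv, hd]; ring) (by rw [hd]; ring) (by omega)
    · rw [PySem.List.pyRange_one_eq_nil (by omega)]
      simp [loopA, hx]

-- ===== VERDICT (by name: the statement is the Claim_ definition above) =====
theorem find_solution_x_spec : Claim_equal_find_solution_x := by
  intro n mod y z z2 _
  unfold Spec_find_solution_x find_solution_x find_solution_x_alt
  exact loopA_eq_fold n mod y z z2 mod.toNat 0 (n * z2) (z - y) []
    (by ring) (by ring) (by omega)
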